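-- pv_equiv track=rewrite | github.com/Eugene-SN/pdf-converter | airflow/dags/content_transformation.py | trim_trailing_empty_columns
-- ===== SOURCE A (Python) =====
-- from typing import Dict, Any, List, Optional, Tuple
--
-- def trim_trailing_empty_columns(matrix: List[List[str]]) -> List[List[str]]:
--     if not matrix:
--         return []
--     col_count = len(matrix[0])
--     last_nonempty = -1
--     for col in range(col_count):
--         if any((row[col] if col < len(row) else '').strip() for row in matrix):
--             last_nonempty = col
--     if last_nonempty == -1:
--         return []
--     trimmed: List[List[str]] = []
--     for row in matrix:
--         padded_row = list(row[:last_nonempty + 1])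
--         if len(padded_row) < last_nonempty + 1:
--             padded_row.extend([''] * (last_nonempty + 1 - len(padded_row)))
--         trimmed.append(padded_row)
--     return trimmed
-- ===== SOURCE B (Python) =====
-- def trim_trailing_empty_columns(matrix):
--     if not matrix:
--         return []
--     col_count = len(matrix[0])
--     last = -1
--     for row in matrix:
--         # scan this row right-to-left, only above the best index found so far
--         for j in range(min(len(row), col_count) - 1, last, -1):
--             if row[j].strip():
--                 last = j
--                 break
--     if last == -1:
--         return []
--     width = last + 1
--     return [(row + [''] * width)[:width] for row in matrix]
-- ===== Notes on version B (the rewrite author's own statement) =====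
-- stated objective: alternative
-- what changed: last_nonempty is found by a row-outer pass (each row scanned right-to-left, stopping at the first non-empty cell above the running maximum) instead of A's column-outer pass that re-scans all rows for every column; output rows are built by pad-then-truncate instead of truncate-then-conditional-extend.
import Mathlib
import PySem

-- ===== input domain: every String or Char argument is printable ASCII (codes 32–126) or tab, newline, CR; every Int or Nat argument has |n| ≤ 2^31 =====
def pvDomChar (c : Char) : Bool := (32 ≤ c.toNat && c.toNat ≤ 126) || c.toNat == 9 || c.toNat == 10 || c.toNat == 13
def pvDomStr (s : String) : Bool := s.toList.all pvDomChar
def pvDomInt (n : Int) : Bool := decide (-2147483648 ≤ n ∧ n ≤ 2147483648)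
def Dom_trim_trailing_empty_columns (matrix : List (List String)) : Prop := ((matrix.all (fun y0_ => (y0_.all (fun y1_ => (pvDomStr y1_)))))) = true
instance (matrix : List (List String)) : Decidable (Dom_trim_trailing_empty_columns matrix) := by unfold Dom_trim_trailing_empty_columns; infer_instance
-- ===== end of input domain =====

-- B finds last_nonempty by a row-outer right-to-left scan (early stop above the running best)
-- instead of A's column-outer pass, and builds rows by pad-then-truncate; same return value.

-- ===== PORT A =====
def trim_trailing_empty_columns (matrix : List (List String)) : List (List String) :=
  if matrix = [] then []
  else
    let col_count : Int := ((matrix.headD []).length : Int)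
    let last_nonempty : Int :=
      (PySem.List.pyRange 0 col_count 1).foldl
        (fun last col =>
          if matrix.any (fun row =>
              PySem.Str.strip
                (if col < (row.length : Int) then (PySem.List.pyGet? row col).getD "" else "") != "")
          then col else last) (-1)
    if last_nonempty = -1 then []
    else
      matrix.foldl (fun trimmed row =>
        let padded := PySem.List.slice row (some 0) (some (last_nonempty + 1))
        let padded :=
          if (padded.length : Int) < last_nonempty + 1 then
            padded ++ List.replicate (last_nonempty + 1 - (padded.length : Int)).toNat ""
          else padded
        trimmed ++ [padded]) []

-- ===== PORT B =====
-- inner loop of B: for j in range(hi, last, -1): if row[j].strip(): return j (break); else fall through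
def pvRowScan (row : List String) (last : Int) (j : Int) : Int :=
  if h : last < j then
    if PySem.Str.strip ((PySem.List.pyGet? row j).getD "") != "" then j
    else pvRowScan row last (j - 1)
  else last
termination_by (j - last).toNat
decreasing_by omega

def trim_trailing_empty_columns_alt (matrix : List (List String)) : List (List String) :=
  if matrix = [] then []
  else
    let col_count : Int := ((matrix.headD []).length : Int)
    let last : Int :=
      matrix.foldl (fun last row => pvRowScan row last (min (row.length : Int) col_count - 1)) (-1)
    if last = -1 then []
    else
      let width : Int := last + 1
      matrix.map (fun row =>
        PySem.List.slice (row ++ List.replicate width.toNat "") (some 0) (some width))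

-- ===== PRECONDITION & SPEC =====
def Spec_trim_trailing_empty_columns (matrix : List (List String)) (out : List (List String)) : Prop := out = trim_trailing_empty_columns_alt matrix
instance (matrix : List (List String)) (out : List (List String)) : Decidable (Spec_trim_trailing_empty_columns matrix out) := by unfold Spec_trim_trailing_empty_columns; infer_instance

-- ===== CLAIM (what is proved, stated in full; the proofs are below) =====
def Claim_equal_trim_trailing_empty_columns : Prop := ∀ (matrix : List (List String)), Dom_trim_trailing_empty_columns matrix → Spec_trim_trailing_empty_columns matrix (trim_trailing_empty_columns matrix)

-- ===== LEMMAS AND PROOFS =====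

-- cell (row, j) is non-empty after stripping
def pvNE (row : List String) (j : Int) : Bool :=
  PySem.Str.strip ((PySem.List.pyGet? row j).getD "") != ""

-- column j has a non-empty cell in some row
def pvP (matrix : List (List String)) (j : Int) : Bool :=
  matrix.any (fun row => pvNE row j)

-- largest column index < n whose column is non-empty, else -1
def pvMaxNE (matrix : List (List String)) : Nat → Int
  | 0 => -1
  | n + 1 => if pvP matrix (n : Int) then (n : Int) else pvMaxNE matrix n

-- largest j' ≤ j with pvNE row j', else -1
def pvRowBest (row : List String) (j : Int) : Int :=
  if h : 0 ≤ j then (if pvNE row j then j else pvRowBest row (j - 1)) else -1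
termination_by (j + 1).toNat
decreasing_by omega

theorem pvRowBest_le (row : List String) (j : Int) :
    pvRowBest row j ≤ max j (-1) ∧ -1 ≤ pvRowBest row j := by
  suffices H : ∀ (m : Nat) (j : Int), (j + 1).toNat ≤ m →
      pvRowBest row j ≤ max j (-1) ∧ -1 ≤ pvRowBest row j from H _ j le_rfl
  intro m
  induction m with
  | zero => intro j hj; rw [pvRowBest, dif_neg (by omega)]; omega
  | succ m ih =>
    intro j hj
    rw [pvRowBest]
    by_cases h : 0 ≤ j
    · rw [dif_pos h]
      by_cases hne : pvNE row j = true
      · rw [if_pos hne]; omega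
      · rw [if_neg hne]
        have := ih (j - 1) (by omega)
        omega
    · rw [dif_neg h]; omega

theorem pvNE_of_ge_len (row : List String) (j : Int) (h : (row.length : Int) ≤ j) :
    pvNE row j = false := by
  have hnone : PySem.List.pyGet? row j = none := by
    rw [PySem.List.pyGet?_eq_none_iff]
    simp [PySem.Raise.InRange]; omega
  simp [pvNE, hnone]
  decide

theorem pvRowBest_of_ge (row : List String) (k : Nat) :
    pvRowBest row ((row.length : Int) - 1 + k) = pvRowBest row ((row.length : Int) - 1) := by
  induction k with
  | zero => simp
  | succ k ih =>
    rw [pvRowBest]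
    have hge : (row.length : Int) ≤ (row.length : Int) - 1 + (k + 1 : Nat) := by push_cast; omega
    have h0 : 0 ≤ (row.length : Int) - 1 + (k + 1 : Nat) := by push_cast; omega
    rw [dif_pos h0, pvNE_of_ge_len row _ hge]
    simp only [Bool.false_eq_true, if_false]
    have harg : (row.length : Int) - 1 + (k + 1 : Nat) - 1 = (row.length : Int) - 1 + k := by
      push_cast; omega
    rw [harg, ih]

-- capping at the row length does not change pvRowBest
theorem pvRowBest_cap (row : List String) (b : Int) :
    pvRowBest row (min (row.length : Int) (b + 1) - 1) = pvRowBest row b := by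
  by_cases h : b + 1 ≤ (row.length : Int)
  · rw [min_eq_right h]; norm_num
  · rw [min_eq_left (by omega)]
    have hb2 : b = (row.length : Int) - 1 + ((b + 1 - row.length).toNat : Int) := by omega
    rw [hb2, pvRowBest_of_ge]

theorem pvRowScan_eq (row : List String) (last j : Int) (hl : -1 ≤ last) :
    pvRowScan row last j = max last (pvRowBest row j) := by
  suffices H : ∀ (m : Nat) (j : Int), (j - last).toNat ≤ m →
      pvRowScan row last j = max last (pvRowBest row j) from H _ j le_rfl
  intro m
  induction m with
  | zero =>
    intro j hj
    rw [pvRowScan, dif_neg (by omega)]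
    have := pvRowBest_le row j
    omega
  | succ m ih =>
    intro j hj
    by_cases h : last < j
    · rw [pvRowScan, dif_pos h]
      have h0 : 0 ≤ j := by omega
      by_cases hne : (PySem.Str.strip ((PySem.List.pyGet? row j).getD "") != "") = true
      · rw [if_pos hne, pvRowBest, dif_pos h0, if_pos (show pvNE row j = true from hne)]
        omega
      · rw [if_neg hne, ih (j - 1) (by omega)]
        conv_rhs => rw [pvRowBest, dif_pos h0, if_neg (show ¬ pvNE row j = true from hne)]
    · rw [pvRowScan, dif_neg h]
      have := pvRowBest_le row j
      omega

theorem pvMaxNE_lt (matrix : List (List String)) (n : Nat) :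
    pvMaxNE matrix n < (n : Int) ∧ -1 ≤ pvMaxNE matrix n := by
  induction n with
  | zero => simp [pvMaxNE]
  | succ n ih =>
    rw [pvMaxNE]
    split <;> push_cast <;> omega

theorem pvMaxNE_nil (n : Nat) : pvMaxNE ([] : List (List String)) n = -1 := by
  induction n with
  | zero => rfl
  | succ n ih => rw [pvMaxNE]; simp [pvP, ih]

-- row-wise decomposition of the column-wise maximum
theorem pvMaxNE_cons (row : List String) (rest : List (List String)) (n : Nat) :
    pvMaxNE (row :: rest) n = max (pvRowBest row ((n : Int) - 1)) (pvMaxNE rest n) := by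
  induction n with
  | zero =>
    simp only [pvMaxNE]
    rw [pvRowBest, dif_neg (by omega)]
    simp
  | succ n ih =>
    have hcast : ((n + 1 : Nat) : Int) - 1 = (n : Int) := by push_cast; omega
    have hcons : pvP (row :: rest) (n : Int) = (pvNE row (n : Int) || pvP rest (n : Int)) := by
      simp [pvP]
    have hRB : pvRowBest row (n : Int)
        = if pvNE row (n : Int) then (n : Int) else pvRowBest row ((n : Int) - 1) := by
      rw [pvRowBest, dif_pos (Int.natCast_nonneg n)]
    have hb1 := pvRowBest_le row ((n : Int) - 1)
    have hb2 := pvMaxNE_lt rest n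
    have hb3 := pvMaxNE_lt rest (n + 1)
    push_cast at hb3
    rw [pvMaxNE, pvMaxNE, hcast, hcons, hRB]
    by_cases hne : pvNE row (n : Int) = true
    · rw [if_pos hne]
      simp only [hne, Bool.true_or, if_true]
      rw [pvMaxNE] at hb3
      omega
    · rw [if_neg hne]
      simp only [(show pvNE row (n : Int) = false by simpa using hne), Bool.false_or]
      by_cases hp : pvP rest (n : Int) = true
      · rw [if_pos hp, if_pos hp]
        omega
      · rw [if_neg hp, if_neg hp, ih]

-- A's column loop computes pvMaxNE
theorem pvA_fold (matrix : List (List String)) (n : Nat) :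
    (PySem.List.pyRange 0 (n : Int) 1).foldl
        (fun last col =>
          if matrix.any (fun row =>
              PySem.Str.strip
                (if col < (row.length : Int) then (PySem.List.pyGet? row col).getD "" else "") != "")
          then col else last) (-1) = pvMaxNE matrix n := by
  have step : ∀ (last col : Int), 0 ≤ col →
      (if matrix.any (fun row =>
          PySem.Str.strip
            (if col < (row.length : Int) then (PySem.List.pyGet? row col).getD "" else "") != "")
       then col else last) = (if pvP matrix col then col else last) := by
    intro last col hc
    have hany : (matrix.any (fun row =>
        PySem.Str.strip
          (if col < (row.length : Int) then (PySem.List.pyGet? row col).getD "" else "") != ""))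
        = pvP matrix col := by
      unfold pvP pvNE
      congr 1
      funext row
      by_cases h : col < (row.length : Int)
      · rw [if_pos h]
      · rw [if_neg h]
        have hnone : PySem.List.pyGet? row col = none := by
          rw [PySem.List.pyGet?_eq_none_iff]
          simp [PySem.Raise.InRange]; omega
        rw [hnone]
        rfl
    rw [hany]
  induction n with
  | zero => simp [pvMaxNE, PySem.List.pyRange_one_eq_nil]
  | succ n ih =>
    have hsplit : PySem.List.pyRange 0 ((n + 1 : Nat) : Int) 1
        = PySem.List.pyRange 0 (n : Int) 1 ++ [(n : Int)] := by
      have hc : ((n + 1 : Nat) : Int) = (n : Int) + 1 := by push_cast; ring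
      rw [hc, PySem.List.pyRange_one_succ_right (Int.natCast_nonneg n)]
    rw [hsplit, List.foldl_append, ih]
    simp only [List.foldl_cons, List.foldl_nil]
    rw [step _ _ (Int.natCast_nonneg n), pvMaxNE]

-- B's row loop computes pvMaxNE
theorem pvB_fold (matrix : List (List String)) (n : Nat) :
    ∀ (acc : Int), -1 ≤ acc →
      matrix.foldl (fun last row => pvRowScan row last (min (row.length : Int) (n : Int) - 1)) acc
        = max acc (pvMaxNE matrix n) := by
  induction matrix with
  | nil =>
    intro acc hacc
    simp only [List.foldl_nil, pvMaxNE_nil]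
    omega
  | cons row rest ih =>
    intro acc hacc
    simp only [List.foldl_cons]
    rw [pvRowScan_eq row acc _ hacc]
    have hcap : pvRowBest row (min (row.length : Int) (n : Int) - 1)
        = pvRowBest row ((n : Int) - 1) := by
      have h := pvRowBest_cap row ((n : Int) - 1)
      have hc : (n : Int) - 1 + 1 = (n : Int) := by ring
      rw [hc] at h
      exact h
    have hb1 := pvRowBest_le row ((n : Int) - 1)
    rw [hcap, ih _ (by omega), pvMaxNE_cons]
    omega

-- the two row-building expressions agree for width w ≥ 1
theorem pvRow_build (row : List String) (w : Int) (hw : 1 ≤ w) :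
    (if ((PySem.List.slice row (some 0) (some w)).length : Int) < w then
        PySem.List.slice row (some 0) (some w)
          ++ List.replicate ((w - ((PySem.List.slice row (some 0) (some w)).length : Int)).toNat) ""
     else PySem.List.slice row (some 0) (some w))
    = PySem.List.slice (row ++ List.replicate w.toNat "") (some 0) (some w) := by
  have h0 : (0 : Int) ≤ w := by omega
  have hk : ((w.toNat : Nat) : Int) = w := Int.toNat_of_nonneg h0
  rw [PySem.List.slice_zero_start, PySem.List.slice_zero_start,
      PySem.List.slice_to _ h0, PySem.List.slice_to _ h0]
  simp only [List.take_append, List.take_replicate, List.length_take]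
  by_cases h : row.length < w.toNat
  · rw [if_pos (by push_cast; omega)]
    congr 2
    omega
  · rw [if_neg (by push_cast; omega)]
    have hz : w.toNat - row.length = 0 := by omega
    simp [hz]

-- ===== VERDICT (by name: the statement is the Claim_ definition above) =====
theorem trim_trailing_empty_columns_spec : Claim_equal_trim_trailing_empty_columns := by
  intro matrix _
  unfold Spec_trim_trailing_empty_columns trim_trailing_empty_columns trim_trailing_empty_columns_alt
  by_cases hm : matrix = []
  · simp [hm]
  · rw [if_neg hm, if_neg hm]
    have hA := pvA_fold matrix ((matrix.headD []).length)
    have hB := pvB_fold matrix ((matrix.headD []).length) (-1) (by omega)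
    rw [max_eq_right (pvMaxNE_lt matrix _).2] at hB
    simp only [hA, hB]
    by_cases heq : pvMaxNE matrix ((matrix.headD []).length) = -1
    · rw [if_pos heq, if_pos heq]
    · rw [if_neg heq, if_neg heq]
      have hw : 1 ≤ pvMaxNE matrix ((matrix.headD []).length) + 1 := by
        have := (pvMaxNE_lt matrix ((matrix.headD []).length)).2
        omega
      rw [PySem.List.foldl_append_singleton_eq_map]
      apply List.map_congr_left
      intro row _
      exact pvRow_build row _ hw
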